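-- pv_equiv track=rewrite | github.com/Preethisreeallam/Variant-Call-Format-VCF-Parser-and-Predictor-Analysis | mini_project1.py | create_dictionary_of_info_field_values
-- ===== SOURCE A (Python) =====
-- def create_dictionary_of_info_field_values(data):
--     """
--     You now need to figure out that data types for each of the info fields.
--     Begin by writing a function that first takes the info fields and turns them into a dictionary.
--     Make sure to skip any fields that do not have a value or are missing a value.
--
--     Note: only return keys that have values!
--     """
--
--     # BEGIN SOLUTION
--     from collections import defaultdict
--     resdict = defaultdict(list)
--     for item in data:
--         for ele in item.split(';'):
--             if '=' not in ele:
--                 continue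
--             k,v = ele.split('=',1)
--             if v == '.':
--                 continue
--             if v not in resdict[k]:
--                 resdict[k].append(v)
--     return resdict
--     pass
-- ===== SOURCE B (Python) =====
-- def create_dictionary_of_info_field_values(data):
--     from collections import defaultdict
--     # phase 1: flatten every record into surviving (key, value) pairs (duplicates kept)
--     pairs = [ele.split('=', 1) for item in data for ele in item.split(';') if '=' in ele]
--     pairs = [(k, v) for k, v in pairs if v != '.']
--     # phase 2: group by key — keys in first-seen order, values deduped in first-seen order
--     resdict = defaultdict(list)
--     for key in dict.fromkeys(k for k, _ in pairs):
--         resdict[key] = list(dict.fromkeys(v for k, v in pairs if k == key))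
--     return resdict
-- ===== Notes on version B (the rewrite author's own statement) =====
-- stated objective: alternative
-- what changed: A builds the dict in one pass, mutating per-key lists with an inline membership check; B first flattens all records into a filtered list of (key,value) pairs, then groups: it dedups the key sequence and, per key, collects and dedups that key's values by scanning the pair list.
import Mathlib
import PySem

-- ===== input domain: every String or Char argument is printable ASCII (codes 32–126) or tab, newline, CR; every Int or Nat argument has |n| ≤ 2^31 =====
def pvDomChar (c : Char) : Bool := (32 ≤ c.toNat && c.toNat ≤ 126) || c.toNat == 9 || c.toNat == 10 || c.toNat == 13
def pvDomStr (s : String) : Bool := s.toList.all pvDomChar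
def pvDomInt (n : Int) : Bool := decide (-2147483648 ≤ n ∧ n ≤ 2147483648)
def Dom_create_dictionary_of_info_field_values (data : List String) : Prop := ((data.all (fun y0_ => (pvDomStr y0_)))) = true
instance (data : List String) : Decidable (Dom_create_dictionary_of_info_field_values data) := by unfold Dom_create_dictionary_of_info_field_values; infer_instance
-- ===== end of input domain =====

-- B flattens all records into a filtered (key,value) pair list and then groups by key
-- (alternative decomposition); A mutates a defaultdict in place — the proved equivalence
-- is about the returned mapping (items list).

-- ===== PORT A =====
-- one iteration of A's inner loop: skip without '=', split once at '=', skip '.', append if new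
def pvAstep (d : PySem.Dict String (List String)) (ele : String) : PySem.Dict String (List String) :=
  if PySem.Str.isIn "=" ele = false then d
  else
    let parts := (PySem.Str.splitMax? ele "=" 1).getD []
    let k := parts.getD 0 ""
    let v := parts.getD 1 ""
    if v = "." then d
    else
      let cur := d.getD k []
      if v ∈ cur then d else d.insert k (cur ++ [v])

def create_dictionary_of_info_field_values (data : List String) : List (String × List String) :=
  (data.foldl (fun d item => ((PySem.Str.split? item ";").getD []).foldl pvAstep d)
    PySem.Dict.empty).items

-- ===== PORT B =====
-- ele.split('=', 1) as a (key, value) pair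
def pvSplitKV (ele : String) : String × String :=
  let parts := (PySem.Str.splitMax? ele "=" 1).getD []
  (parts.getD 0 "", parts.getD 1 "")

-- phase 1 of Source B: flatten every record into surviving (key, value) pairs (duplicates kept)
def pvPairs (data : List String) : List (String × String) :=
  (((data.flatMap (fun item => (PySem.Str.split? item ";").getD [])).filter
      (fun ele => PySem.Str.isIn "=" ele)).map pvSplitKV).filter
    (fun p => p.2 != ".")

-- phase 2 of Source B: keys in first-seen order, each key's values collected and deduped
def create_dictionary_of_info_field_values_alt (data : List String) : List (String × List String) :=
  let pairs := pvPairs data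
  let keys := PySem.List.dedup (pairs.map Prod.fst)
  keys.map (fun k =>
    (k, PySem.List.dedup ((pairs.filter (fun p => p.1 == k)).map Prod.snd)))

-- ===== PRECONDITION & SPEC =====
def Spec_create_dictionary_of_info_field_values (data : List String) (out : List (String × List String)) : Prop := out = create_dictionary_of_info_field_values_alt data
instance (data : List String) (out : List (String × List String)) : Decidable (Spec_create_dictionary_of_info_field_values data out) := by unfold Spec_create_dictionary_of_info_field_values; infer_instance

-- ===== CLAIM (what is proved, stated in full; the proofs are below) =====
def Claim_equal_create_dictionary_of_info_field_values : Prop := ∀ (data : List String), Dom_create_dictionary_of_info_field_values data → Spec_create_dictionary_of_info_field_values data (create_dictionary_of_info_field_values data)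

-- ===== LEMMAS AND PROOFS =====
-- A's surviving step, expressed on an already-split (key, value) pair
def pvPairStep (d : PySem.Dict String (List String)) (p : String × String) :
    PySem.Dict String (List String) :=
  let cur := d.getD p.1 []
  if p.2 ∈ cur then d else d.insert p.1 (cur ++ [p.2])

-- the surviving pairs of a list of ';'-entries (B's pipeline, on any entry list)
def pvPairsOf (es : List String) : List (String × String) :=
  ((es.filter (fun ele => PySem.Str.isIn "=" ele)).map pvSplitKV).filter (fun p => p.2 != ".")

theorem pvA_flat (data : List String) (d : PySem.Dict String (List String)) :
    data.foldl (fun d item => ((PySem.Str.split? item ";").getD []).foldl pvAstep d) d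
      = (data.flatMap (fun item => (PySem.Str.split? item ";").getD [])).foldl pvAstep d := by
  induction data generalizing d with
  | nil => rfl
  | cons x xs ih => simp [List.flatMap_cons, List.foldl_append, ih]

theorem pvA_eq_pairs (es : List String) (d : PySem.Dict String (List String)) :
    es.foldl pvAstep d = (pvPairsOf es).foldl pvPairStep d := by
  induction es generalizing d with
  | nil => rfl
  | cons e es ih =>
    rw [List.foldl_cons]
    by_cases hin : PySem.Str.isIn "=" e = true
    · have hstep : pvAstep d e
          = if (pvSplitKV e).2 = "." then d else pvPairStep d (pvSplitKV e) := by
        simp only [pvAstep, pvPairStep, pvSplitKV, hin]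
        rfl
      by_cases hdot : (pvSplitKV e).2 = "."
      · have hbne : ((pvSplitKV e).2 != ".") = false := by simp [hdot]
        have hpairs : pvPairsOf (e :: es) = pvPairsOf es := by
          simp only [pvPairsOf, List.filter_cons, hin, if_true, List.map_cons, hbne, Bool.false_eq_true,
            if_false]
        rw [hstep, if_pos hdot, hpairs, ih]
      · have hbne : ((pvSplitKV e).2 != ".") = true := by simp [hdot]
        have hpairs : pvPairsOf (e :: es) = pvSplitKV e :: pvPairsOf es := by
          simp only [pvPairsOf, List.filter_cons, hin, if_true, List.map_cons, hbne]
        rw [hstep, if_neg hdot, hpairs, List.foldl_cons, ih]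
    · have hin' : PySem.Str.isIn "=" e = false := by
        cases h : PySem.Str.isIn "=" e
        · rfl
        · exact absurd h hin
      have hstep : pvAstep d e = d := by
        unfold pvAstep
        rw [hin']
        simp
      have hpairs : pvPairsOf (e :: es) = pvPairsOf es := by
        simp only [pvPairsOf, List.filter_cons, hin', Bool.false_eq_true, if_false]
      rw [hstep, hpairs, ih]

-- invariant of the grouping: keys are the deduped key sequence, each value list the deduped
-- value sequence of that key
theorem pvGroup_inv (ps : List (String × String)) :
    (ps.foldl pvPairStep PySem.Dict.empty).keys = PySem.Set.ofList (ps.map Prod.fst) ∧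
    ∀ k, (ps.foldl pvPairStep PySem.Dict.empty).getD k []
        = PySem.Set.ofList ((ps.filter (fun p => p.1 == k)).map Prod.snd) := by
  induction ps using List.reverseRecOn with
  | nil => exact ⟨rfl, fun k => by simp [PySem.Dict.getD_empty, PySem.Set.ofList]⟩
  | append_singleton ps p ih =>
    obtain ⟨hk, hv⟩ := ih
    obtain ⟨k, v⟩ := p
    rw [List.foldl_append, List.foldl_cons, List.foldl_nil]
    set d := ps.foldl pvPairStep PySem.Dict.empty with hd
    have hone : ∀ k', ((k, v) :: []).filter (fun p => p.1 == k')
        = if k = k' then [(k, v)] else [] := by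
      intro k'
      by_cases h : k = k' <;> simp [h]
    simp only [pvPairStep]
    by_cases hmem : v ∈ d.getD k []
    · rw [if_pos hmem]
      have hkk : k ∈ d.keys := by
        by_contra hc
        have : d.contains k = false := by
          rw [PySem.Dict.contains_eq_decide_mem_keys]; simpa using hc
        rw [PySem.Dict.getD_of_not_contains _ _ this] at hmem
        simp at hmem
      refine ⟨?_, fun k' => ?_⟩
      · rw [List.map_append, List.map_cons, List.map_nil,
          PySem.Set.ofList_append_singleton, ← hk, PySem.Set.add_of_mem hkk]
      · rw [List.filter_append, hone k']
        by_cases hke : k = k'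
        · subst hke
          rw [if_pos rfl, List.map_append, List.map_cons, List.map_nil,
            PySem.Set.ofList_append_singleton, ← hv k, PySem.Set.add_of_mem hmem]
        · rw [if_neg hke, List.append_nil]
          exact hv k'
    · rw [if_neg hmem]
      refine ⟨?_, fun k' => ?_⟩
      · rw [List.map_append, List.map_cons, List.map_nil,
          PySem.Set.ofList_append_singleton, ← hk, PySem.Set.add_eq_ite]
        by_cases hkk : k ∈ d.keys
        · have hc : d.contains k = true := by
            rw [PySem.Dict.contains_eq_decide_mem_keys]; simpa using hkk
          rw [PySem.Dict.keys_insert_of_contains _ _ hc, if_pos hkk]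
        · have hc : d.contains k = false := by
            rw [PySem.Dict.contains_eq_decide_mem_keys]; simpa using hkk
          rw [PySem.Dict.keys_insert_of_not_contains _ _ hc, if_neg hkk]
      · rw [PySem.Dict.getD_insert, List.filter_append, hone k']
        by_cases hke : k = k'
        · subst hke
          rw [if_pos rfl, if_pos rfl, List.map_append, List.map_cons, List.map_nil,
            PySem.Set.ofList_append_singleton, ← hv k, PySem.Set.add_of_not_mem hmem]
        · rw [if_neg (fun h => hke h.symm), if_neg hke, List.append_nil]
          exact hv k'

-- ===== VERDICT (by name: the statement is the Claim_ definition above) =====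
theorem create_dictionary_of_info_field_values_spec :
    Claim_equal_create_dictionary_of_info_field_values := by
  intro data _
  unfold Spec_create_dictionary_of_info_field_values
  simp only [create_dictionary_of_info_field_values,
    create_dictionary_of_info_field_values_alt]
  rw [pvA_flat, pvA_eq_pairs]
  have hpp : pvPairsOf (data.flatMap (fun item => (PySem.Str.split? item ";").getD []))
      = pvPairs data := rfl
  rw [hpp]
  obtain ⟨hk, hv⟩ := pvGroup_inv (pvPairs data)
  set d := (pvPairs data).foldl pvPairStep PySem.Dict.empty with hd
  have hnd : d.keys.Nodup := by rw [hk]; exact PySem.Set.nodup_ofList _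
  rw [PySem.Dict.items_eq_map_keys d hnd [], hk, PySem.List.dedup_eq_ofList]
  exact List.map_congr_left (fun k _ => by rw [hv k, PySem.List.dedup_eq_ofList])
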